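-- pv_equiv track=rewrite | github.com/Adiaslow/Conformacophore | src/core/services/xtc_converter.py | _create_conect_records
-- ===== SOURCE A (Python) =====
-- from typing import (
--     Dict,
--     List,
--     Optional,
--     Set,
--     Tuple,
--     Iterator,
--     Union,
--     Any,
--     TypeVar,
--     Generic,
--     Sequence,
--     cast,
-- )
--
-- def _create_conect_records(bonds: List[Tuple[int, int]]) -> str:
--     """Create all CONECT records.
--
--     Args:
--         bonds: List of (atom1, atom2) indices
--
--     Returns:
--         String containing all CONECT records
--     """
--     # Group bonds by first atom
--     bond_groups: Dict[int, List[int]] = {}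
--     for a1, a2 in bonds:
--         if a1 not in bond_groups:
--             bond_groups[a1] = []
--         bond_groups[a1].append(a2)
--
--     # Create CONECT records
--     records = []
--     for atom1 in sorted(bond_groups.keys()):
--         bonded = bond_groups[atom1]
--         record = f"CONECT{atom1:>5d}"
--         for atom2 in sorted(bonded):
--             record += f"{atom2:>5d}"
--         records.append(record)
--
--     return "\n".join(records) + "\n"
-- ===== SOURCE B (Python) =====
-- def _create_conect_records(bonds):
--     """Create all CONECT records (one global sort + single linear scan)."""
--     sb = sorted(bonds)
--     records = []
--     i = 0
--     n = len(sb)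
--     while i < n:
--         a1 = sb[i][0]
--         record = f"CONECT{a1:>5d}"
--         while i < n and sb[i][0] == a1:
--             record += f"{sb[i][1]:>5d}"
--             i += 1
--         records.append(record)
--     return "\n".join(records) + "\n"
-- ===== Notes on version B (the rewrite author's own statement) =====
-- stated objective: alternative
-- what changed: Replaces the dict-of-lists grouping plus a per-key sort of every group by one global lexicographic sort of the bond tuples followed by a single linear scan that emits a record each time the first atom changes.
import Mathlib
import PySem

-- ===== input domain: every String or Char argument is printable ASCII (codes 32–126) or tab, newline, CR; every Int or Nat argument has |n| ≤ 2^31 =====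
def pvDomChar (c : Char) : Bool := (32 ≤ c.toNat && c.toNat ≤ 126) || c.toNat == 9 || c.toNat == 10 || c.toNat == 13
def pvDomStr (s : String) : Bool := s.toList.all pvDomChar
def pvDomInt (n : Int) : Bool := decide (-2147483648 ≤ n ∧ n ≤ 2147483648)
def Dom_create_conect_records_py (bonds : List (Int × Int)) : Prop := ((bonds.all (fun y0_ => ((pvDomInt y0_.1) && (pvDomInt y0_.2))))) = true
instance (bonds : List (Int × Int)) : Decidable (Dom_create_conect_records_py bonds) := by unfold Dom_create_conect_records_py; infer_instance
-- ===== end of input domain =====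

-- B replaces A's dict-of-lists grouping with per-key sorts by one global lexicographic
-- sort of the bonds followed by a single linear scan (objective: alternative decomposition).

-- f"{n:>5d}": str(n) right-aligned in width 5 with spaces (shared by both ports,
-- both Pythons use the identical f-string format)
def pvFmt5 (n : Int) : List Char :=
  let s := PySem.Int.toChars n
  List.replicate (5 - s.length) ' ' ++ s

-- ===== PORT A =====
def create_conect_records_py (bonds : List (Int × Int)) : String :=
  -- bond_groups: Dict built by "if a1 not in bond_groups: bond_groups[a1] = []; bond_groups[a1].append(a2)"
  let bond_groups : PySem.Dict Int (List Int) := bonds.foldl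
    (fun d p =>
      (if d.contains p.1 then d else d.insert p.1 ([] : List Int)).modify p.1 []
        (fun l => l ++ [p.2]))
    PySem.Dict.empty
  let records := (PySem.List.sorted bond_groups.keys (fun k => k) false).map (fun atom1 =>
      (PySem.List.sorted (bond_groups.getD atom1 []) (fun v => v) false).foldl
        (fun record atom2 => record ++ pvFmt5 atom2)
        ("CONECT".toList ++ pvFmt5 atom1))
  String.ofList (PySem.Chars.join ['\n'] records ++ ['\n'])

-- ===== PORT B =====
-- the outer while loop of Source B: one record per run of equal first atoms
def pvAltGroups : List (Int × Int) → List (List Char)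
  | [] => []
  | (a1, a2) :: rest =>
      ((rest.takeWhile (fun p => p.1 == a1)).foldl (fun record p => record ++ pvFmt5 p.2)
          ("CONECT".toList ++ pvFmt5 a1 ++ pvFmt5 a2))
        :: pvAltGroups (rest.dropWhile (fun p => p.1 == a1))
termination_by l => l.length
decreasing_by
  simpa using Nat.lt_succ_of_le (List.length_dropWhile_le _ _)

def create_conect_records_py_alt (bonds : List (Int × Int)) : String :=
  String.ofList (PySem.Chars.join ['\n']
      (pvAltGroups (PySem.List.sorted2 bonds (fun p => p.1) (fun p => p.2) false)) ++ ['\n'])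

-- ===== PRECONDITION & SPEC =====
def Spec_create_conect_records_py (bonds : List (Int × Int)) (out : String) : Prop := out = create_conect_records_py_alt bonds
instance (bonds : List (Int × Int)) (out : String) : Decidable (Spec_create_conect_records_py bonds out) := by unfold Spec_create_conect_records_py; infer_instance

-- ===== CLAIM (what is proved, stated in full; the proofs are below) =====
def Claim_equal_create_conect_records_py : Prop := ∀ (bonds : List (Int × Int)), Dom_create_conect_records_py bonds → Spec_create_conect_records_py bonds (create_conect_records_py bonds)

-- ===== LEMMAS AND PROOFS =====

-- the lexicographic order sorted(bonds) uses
def pvLexLe (p q : Int × Int) : Prop := p.1 < q.1 ∨ (p.1 = q.1 ∧ p.2 ≤ q.2)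

-- the strict comparison sorted2 … (·.1) (·.2) false inserts by
def pvBefore (p q : Int × Int) : Bool :=
  decide (p.1 < q.1) || !decide (q.1 < p.1) && decide (p.2 < q.2)

-- the run heads pvAltGroups emits, in order
def pvKeysOf : List (Int × Int) → List Int
  | [] => []
  | (a1, _) :: rest => a1 :: pvKeysOf (rest.dropWhile (fun p => p.1 == a1))
termination_by l => l.length
decreasing_by
  simpa using Nat.lt_succ_of_le (List.length_dropWhile_le _ _)

-- canonical shape of one CONECT record
def pvRec (k : Int) (vs : List Int) : List Char :=
  "CONECT".toList ++ pvFmt5 k ++ vs.flatMap pvFmt5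

lemma pv_foldl_rec (init : List Char) (l : List (Int × Int)) :
    l.foldl (fun record p => record ++ pvFmt5 p.2) init
      = init ++ l.flatMap (fun p => pvFmt5 p.2) := by
  simpa using PySem.List.foldl_append_eq_flatMap (fun p => pvFmt5 p.2) l init

lemma pv_foldl_rec2 (init : List Char) (l : List Int) :
    l.foldl (fun record v => record ++ pvFmt5 v) init = init ++ l.flatMap pvFmt5 := by
  simpa using PySem.List.foldl_append_eq_flatMap pvFmt5 l init

lemma pvBefore_false_iff (p q : Int × Int) : pvBefore q p = false ↔ pvLexLe p q := by
  simp [pvBefore, pvLexLe]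
  omega

lemma pvBefore_asymm (p q : Int × Int) (h : pvBefore p q = true) : pvBefore q p = false := by
  simp [pvBefore] at h ⊢
  omega

lemma pvBefore_trans (p q r : Int × Int) (h1 : pvBefore p q = true) (h2 : pvBefore q r = true) :
    pvBefore p r = true := by
  simp [pvBefore] at h1 h2 ⊢
  omega

lemma pv_step_eq (d : PySem.Dict Int (List Int)) (p : Int × Int) :
    (if d.contains p.1 then d else d.insert p.1 ([] : List Int)).modify p.1 []
        (fun l => l ++ [p.2])
      = d.modify p.1 [] (fun l => l ++ [p.2]) := by
  cases h : d.contains p.1 with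
  | true => simp
  | false =>
    simp only [Bool.false_eq_true, if_false, PySem.Dict.modify,
      PySem.Dict.getD_insert_self, PySem.Dict.insert_insert_self,
      PySem.Dict.getD_of_not_contains d _ h, List.nil_append]

lemma pv_fold_eq (bonds : List (Int × Int)) :
    bonds.foldl
        (fun d p =>
          (if d.contains p.1 then d else d.insert p.1 ([] : List Int)).modify p.1 []
            (fun l => l ++ [p.2]))
        PySem.Dict.empty
      = bonds.foldl (fun d p => d.modify p.1 [] (fun l => l ++ [p.2])) PySem.Dict.empty := by
  have hf : (fun (d : PySem.Dict Int (List Int)) (p : Int × Int) =>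
        (if d.contains p.1 then d else d.insert p.1 ([] : List Int)).modify p.1 []
          (fun l => l ++ [p.2]))
      = fun d p => d.modify p.1 [] (fun l => l ++ [p.2]) :=
    funext fun d => funext fun p => pv_step_eq d p
  rw [hf]

lemma pv_bg_getD (bonds : List (Int × Int)) (k : Int) :
    (bonds.foldl
        (fun d p =>
          (if d.contains p.1 then d else d.insert p.1 ([] : List Int)).modify p.1 []
            (fun l => l ++ [p.2]))
        PySem.Dict.empty).getD k []
      = (bonds.filter (fun p => p.1 == k)).map (fun p => p.2) := by
  rw [pv_fold_eq, PySem.Dict.getD_foldl_modify_append,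
    PySem.Dict.getD_of_not_contains _ _ (by simp [PySem.Dict.contains_empty]), List.nil_append]

lemma pv_bg_keys (bonds : List (Int × Int)) :
    (bonds.foldl
        (fun d p =>
          (if d.contains p.1 then d else d.insert p.1 ([] : List Int)).modify p.1 []
            (fun l => l ++ [p.2]))
        PySem.Dict.empty).keys
      = PySem.Set.ofList (bonds.map (fun p => p.1)) := by
  rw [pv_fold_eq, PySem.Dict.keys_foldl_modify_key bonds (fun p => p.1) []
    (fun _ p => fun l => l ++ [p.2]) PySem.Dict.empty]
  simp [PySem.Dict.keys_empty, PySem.Set.update, PySem.Set.ofList, PySem.Set.empty]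

lemma pv_pairwise_insertBy (x : Int × Int) (ys : List (Int × Int))
    (h : ys.Pairwise (fun a b => pvBefore b a = false)) :
    (PySem.List.insertBy pvBefore x ys).Pairwise (fun a b => pvBefore b a = false) := by
  induction ys with
  | nil => simp [PySem.List.insertBy]
  | cons y ys ih =>
    rw [List.pairwise_cons] at h
    obtain ⟨hy, hys⟩ := h
    rw [PySem.List.insertBy]
    by_cases hb : pvBefore x y = true
    · rw [if_pos hb, List.pairwise_cons]
      refine ⟨?_, List.pairwise_cons.mpr ⟨hy, hys⟩⟩
      intro z hz
      rcases List.mem_cons.mp hz with rfl | hz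
      · exact pvBefore_asymm x z hb
      · by_contra hzx
        rw [Bool.not_eq_false] at hzx
        have := pvBefore_trans z x y hzx hb
        rw [hy z hz] at this
        exact Bool.false_ne_true this
    · rw [if_neg hb, List.pairwise_cons]
      refine ⟨?_, ih hys⟩
      intro z hz
      rcases (PySem.List.mem_insertBy pvBefore x z ys).mp hz with rfl | hz
      · exact Bool.not_eq_true _ |>.mp hb
      · exact hy z hz

lemma pv_foldl_insertBy_pairwise (xs acc : List (Int × Int))
    (h : acc.Pairwise (fun a b => pvBefore b a = false)) :
    (xs.foldl (fun acc x => PySem.List.insertBy pvBefore x acc) acc).Pairwise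
      (fun a b => pvBefore b a = false) := by
  induction xs generalizing acc with
  | nil => exact h
  | cons x xs ih => exact ih _ (pv_pairwise_insertBy x acc h)

lemma pv_sorted2_pairwise (bonds : List (Int × Int)) :
    (PySem.List.sorted2 bonds (fun p => p.1) (fun p => p.2) false).Pairwise pvLexLe := by
  have h0 : PySem.List.sorted2 bonds (fun p => p.1) (fun p => p.2) false
      = bonds.foldl (fun acc x => PySem.List.insertBy pvBefore x acc) [] := rfl
  rw [h0]
  exact (pv_foldl_insertBy_pairwise bonds [] List.Pairwise.nil).imp
    (fun hab => (pvBefore_false_iff _ _).mp hab)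

lemma pv_drop_gt (a : Int) (rest : List (Int × Int))
    (h : rest.Pairwise pvLexLe) (hge : ∀ p ∈ rest, a ≤ p.1) :
    ∀ p ∈ rest.dropWhile (fun p => p.1 == a), a < p.1 := by
  induction rest with
  | nil => simp
  | cons r rs ih =>
    intro p hp
    rw [List.dropWhile_cons] at hp
    by_cases hr : (r.1 == a) = true
    · rw [if_pos hr] at hp
      exact ih (List.pairwise_cons.mp h).2 (fun q hq => hge q (List.mem_cons_of_mem r hq)) p hp
    · rw [if_neg hr] at hp
      have hrne : r.1 ≠ a := by simpa using hr
      have hra : a < r.1 := lt_of_le_of_ne (hge r List.mem_cons_self) (Ne.symm hrne)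
      rcases List.mem_cons.mp hp with rfl | hp
      · exact hra
      · have hlex := (List.pairwise_cons.mp h).1 p hp
        rcases hlex with h1 | ⟨h1, _⟩ <;> omega

lemma pv_mem_keysOf (l : List (Int × Int)) (k : Int) :
    k ∈ pvKeysOf l ↔ k ∈ l.map (fun p => p.1) := by
  induction l using pvKeysOf.induct with
  | case1 => simp [pvKeysOf]
  | case2 a1 a2 rest ih =>
    rw [pvKeysOf]
    simp only [List.mem_cons, List.map_cons, ih]
    constructor
    · rintro (rfl | hk)
      · exact Or.inl rfl
      · exact Or.inr (((rest.dropWhile_sublist (p := fun p => p.1 == a1)).map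
          (fun p => p.1)).mem hk)
    · rintro (rfl | hk)
      · exact Or.inl rfl
      · obtain ⟨p, hp, rfl⟩ := List.mem_map.mp hk
        by_cases hpa : (p.1 == a1) = true
        · exact Or.inl (by simpa using hpa)
        · refine Or.inr (List.mem_map.mpr ⟨p, ?_, rfl⟩)
          rw [← List.takeWhile_append_dropWhile (p := fun p => p.1 == a1) (l := rest)] at hp
          rcases List.mem_append.mp hp with hp | hp
          · exact absurd (List.mem_takeWhile_imp hp) hpa
          · exact hp

lemma pv_keysOf_pairwise (l : List (Int × Int)) (h : l.Pairwise pvLexLe) :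
    (pvKeysOf l).Pairwise (· < ·) := by
  induction l using pvKeysOf.induct with
  | case1 => simp [pvKeysOf]
  | case2 a1 a2 rest ih =>
    rw [pvKeysOf, List.pairwise_cons]
    obtain ⟨hhead, htail⟩ := List.pairwise_cons.mp h
    have hge : ∀ p ∈ rest, a1 ≤ p.1 := by
      intro p hp
      rcases hhead p hp with h1 | ⟨h1, _⟩ <;> omega
    refine ⟨?_, ih (htail.sublist (rest.dropWhile_sublist _))⟩
    intro k hk
    obtain ⟨p, hp, rfl⟩ := List.mem_map.mp ((pv_mem_keysOf _ k).mp hk)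
    exact pv_drop_gt a1 rest htail hge p hp

lemma pv_filter_drop_nil (a : Int) (rest : List (Int × Int))
    (h : rest.Pairwise pvLexLe) (hge : ∀ p ∈ rest, a ≤ p.1) :
    (rest.dropWhile (fun p => p.1 == a)).filter (fun p => p.1 == a) = [] := by
  rw [List.filter_eq_nil_iff]
  intro p hp
  have := pv_drop_gt a rest h hge p hp
  simp only [beq_iff_eq]
  omega

lemma pv_filter_eq_takeWhile (a : Int) (rest : List (Int × Int))
    (h : rest.Pairwise pvLexLe) (hge : ∀ p ∈ rest, a ≤ p.1) :
    rest.filter (fun p => p.1 == a) = rest.takeWhile (fun p => p.1 == a) := by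
  conv_lhs => rw [← List.takeWhile_append_dropWhile (p := fun p => p.1 == a) (l := rest)]
  rw [List.filter_append, pv_filter_drop_nil a rest h hge, List.append_nil,
    List.filter_eq_self.mpr (fun q hq => List.mem_takeWhile_imp (p := fun r => r.1 == a) (l := rest) hq)]

lemma pv_altGroups_eq (l : List (Int × Int)) (h : l.Pairwise pvLexLe) :
    pvAltGroups l
      = (pvKeysOf l).map (fun k =>
          pvRec k ((l.filter (fun p => p.1 == k)).map (fun p => p.2))) := by
  induction l using pvAltGroups.induct with
  | case1 => rw [pvAltGroups, pvKeysOf]; rfl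
  | case2 a1 a2 rest ih =>
    obtain ⟨hhead, htail⟩ := List.pairwise_cons.mp h
    have hge : ∀ p ∈ rest, a1 ≤ p.1 := by
      intro p hp
      rcases hhead p hp with h1 | ⟨h1, _⟩ <;> omega
    rw [pvAltGroups, pvKeysOf, List.map_cons]
    congr 1
    · -- head record
      rw [pv_foldl_rec]
      simp only [pvRec, List.filter_cons, beq_self_eq_true, if_pos, List.map_cons,
        List.flatMap_cons, pv_filter_eq_takeWhile a1 rest htail hge]
      simp [List.flatMap_map, List.append_assoc]
    · -- tail records
      rw [ih (htail.sublist (rest.dropWhile_sublist _))]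
      apply List.map_congr_left
      intro k hk
      obtain ⟨p, hp, rfl⟩ := List.mem_map.mp ((pv_mem_keysOf _ k).mp hk)
      have hkgt : a1 < p.1 := pv_drop_gt a1 rest htail hge p hp
      congr 2
      rw [List.filter_cons]
      have h1 : ((a1, a2).1 == p.1) = false := by simp; omega
      rw [if_neg (by simp [h1])]
      have h2 : (rest.takeWhile (fun q => q.1 == a1)).filter (fun q => q.1 == p.1) = [] := by
        rw [List.filter_eq_nil_iff]
        intro q hq
        have := List.mem_takeWhile_imp hq
        simp only [beq_iff_eq] at this ⊢
        omega
      conv_rhs => rw [← List.takeWhile_append_dropWhile (p := fun q => q.1 == a1) (l := rest)]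
      rw [List.filter_append, h2, List.nil_append]


-- ===== VERDICT (by name: the statement is the Claim_ definition above) =====
theorem create_conect_records_py_spec : Claim_equal_create_conect_records_py := by
  intro bonds _
  unfold Spec_create_conect_records_py create_conect_records_py create_conect_records_py_alt
  set ys := PySem.List.sorted2 bonds (fun p => p.1) (fun p => p.2) false with hys
  have hpw : ys.Pairwise pvLexLe := pv_sorted2_pairwise bonds
  have hperm : ys.Perm bonds := PySem.List.sorted2_perm bonds _ _ false
  rw [pv_altGroups_eq ys hpw]
  simp only [pv_bg_getD, pv_bg_keys]
  -- the sorted distinct keys are exactly the run heads of ys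
  have hkeys : PySem.List.sorted (PySem.Set.ofList (bonds.map (fun p => p.1))) (fun k => k) false
      = pvKeysOf ys := by
    apply PySem.List.sorted_eq_of_perm_of_pairwise_lt
    · have h1 : (pvKeysOf ys).Nodup :=
        (pv_keysOf_pairwise ys hpw).imp (fun hab => ne_of_lt hab)
      have h2 : (PySem.Set.ofList (bonds.map (fun p => p.1)) : List Int).Nodup :=
        PySem.Set.nodup_ofList _
      rw [List.perm_ext_iff_of_nodup h1 h2]
      intro k
      rw [pv_mem_keysOf, PySem.Set.mem_ofList]
      exact (hperm.map (fun p => p.1)).mem_iff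
    · exact pv_keysOf_pairwise ys hpw
  rw [hkeys]
  have hmap : (pvKeysOf ys).map (fun atom1 =>
        List.foldl (fun record atom2 => record ++ pvFmt5 atom2) ("CONECT".toList ++ pvFmt5 atom1)
          (PySem.List.sorted (List.map (fun p => p.2) (List.filter (fun p => p.1 == atom1) bonds))
            (fun v => v) false))
      = (pvKeysOf ys).map (fun k =>
          pvRec k ((ys.filter (fun p => p.1 == k)).map (fun p => p.2))) := by
    apply List.map_congr_left
    intro k hk
    -- per key: sorting A's group list gives exactly ys's run, already in order
    have hgroup : PySem.List.sorted ((bonds.filter (fun p => p.1 == k)).map (fun p => p.2))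
        (fun v => v) false = (ys.filter (fun p => p.1 == k)).map (fun p => p.2) := by
      apply PySem.List.sorted_id_eq_of_perm_of_pairwise
      · exact (hperm.filter _).map _
      · have hf : (ys.filter (fun p => p.1 == k)).Pairwise pvLexLe :=
          hpw.sublist List.filter_sublist
        rw [List.pairwise_map]
        refine List.Pairwise.imp_of_mem ?_ hf
        intro a b ha hb hab
        have ha1 : a.1 = k := by simpa using (List.mem_filter.mp ha).2
        have hb1 : b.1 = k := by simpa using (List.mem_filter.mp hb).2
        rcases hab with h1 | ⟨h1, h2⟩ <;> omega
    rw [hgroup, pv_foldl_rec2, pvRec, List.append_assoc]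
  rw [hmap]
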